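-- pv_equiv track=rewrite | github.com/ProgressLM/ProgressLM | eval/eval_results/progress_evaluation.py | calculate_gt_distribution
-- ===== SOURCE A (Python) =====
-- from typing import Dict, List, Any, Tuple, Optional, Union
--
-- def calculate_gt_distribution(results: List[Dict[str, Any]]) -> Dict[str, int]:
--     """
--     Calculate ground truth distribution (numeric vs n/a).
--
--     Args:
--         results: List of result dictionaries
--
--     Returns:
--         Dictionary with counts:
--         {
--             'gt_numeric_count': int,  # Both ref and score are numeric
--             'gt_na_count': int,       # Either ref or score is n/a
--             'gt_ref_numeric': int,
--             'gt_ref_na': int,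
--             'gt_score_numeric': int,
--             'gt_score_na': int
--         }
--     """
--     gt_numeric_count = 0
--     gt_na_count = 0
--     gt_ref_numeric = 0
--     gt_ref_na = 0
--     gt_score_numeric = 0
--     gt_score_na = 0
--
--     for result in results:
--         meta = result.get('meta_data', {})
--         gt_ref = meta.get('closest_idx')
--         gt_score = meta.get('progress_score')
--
--         # Count ref
--         if gt_ref is not None:
--             gt_ref_numeric += 1
--         else:
--             gt_ref_na += 1
--
--         # Count score
--         if gt_score is not None:
--             gt_score_numeric += 1
--         else:
--             gt_score_na += 1
--
--         # Count combined (both numeric)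
--         if gt_ref is not None and gt_score is not None:
--             gt_numeric_count += 1
--         else:
--             gt_na_count += 1
--
--     return {
--         'gt_numeric_count': gt_numeric_count,
--         'gt_na_count': gt_na_count,
--         'gt_ref_numeric': gt_ref_numeric,
--         'gt_ref_na': gt_ref_na,
--         'gt_score_numeric': gt_score_numeric,
--         'gt_score_na': gt_score_na
--     }
-- ===== SOURCE B (Python) =====
-- def calculate_gt_distribution(results):
--     # Contingency table: tally (ref_present, score_present) pairs, then derive
--     # the six counts from the table and len(results) by subtraction.
--     table = {}
--     for result in results:
--         meta = result.get('meta_data', {})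
--         key = (meta.get('closest_idx') is not None,
--                meta.get('progress_score') is not None)
--         table[key] = table.get(key, 0) + 1
--     n = len(results)
--     numeric = table.get((True, True), 0)
--     ref_numeric = numeric + table.get((True, False), 0)
--     score_numeric = numeric + table.get((False, True), 0)
--     return {
--         'gt_numeric_count': numeric,
--         'gt_na_count': n - numeric,
--         'gt_ref_numeric': ref_numeric,
--         'gt_ref_na': n - ref_numeric,
--         'gt_score_numeric': score_numeric,
--         'gt_score_na': n - score_numeric,
--     }
-- ===== Notes on version B (the rewrite author's own statement) =====
-- stated objective: alternative
-- what changed: B replaces A's six independent accumulators by a single contingency table keyed on the pair (ref present, score present), built in one pass, and then derives all six counts from the table and len(results) by summation/subtraction.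
import Mathlib
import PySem

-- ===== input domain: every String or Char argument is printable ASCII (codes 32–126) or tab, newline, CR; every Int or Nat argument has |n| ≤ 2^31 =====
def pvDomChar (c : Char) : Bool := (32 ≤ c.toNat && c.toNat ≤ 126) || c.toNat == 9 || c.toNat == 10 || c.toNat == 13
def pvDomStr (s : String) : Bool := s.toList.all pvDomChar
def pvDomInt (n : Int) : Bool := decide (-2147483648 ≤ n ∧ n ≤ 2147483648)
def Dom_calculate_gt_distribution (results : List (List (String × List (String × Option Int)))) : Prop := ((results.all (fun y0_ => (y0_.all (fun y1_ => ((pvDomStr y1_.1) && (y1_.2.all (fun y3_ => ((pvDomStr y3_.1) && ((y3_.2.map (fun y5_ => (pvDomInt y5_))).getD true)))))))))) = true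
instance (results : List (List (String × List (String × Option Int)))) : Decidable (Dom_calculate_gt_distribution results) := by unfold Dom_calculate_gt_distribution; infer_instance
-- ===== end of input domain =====

-- B replaces A's six running accumulators by a contingency table of (ref present, score present)
-- pairs plus a derivation step; same O(n) cost, alternative data structure.

-- ===== PORT A =====
-- shared helpers: result.get('meta_data', {}); meta.get(k) (the stored value is Optional[int], so join)
def pvMeta (r : List (String × List (String × Option Int))) : List (String × Option Int) :=
  (PySem.Dict.get? (PySem.Dict.mk r) "meta_data").getD []

def pvGetOpt (md : List (String × Option Int)) (k : String) : Option Int :=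
  (PySem.Dict.get? (PySem.Dict.mk md) k).getD none

-- the body of A's for-loop, verbatim
def pvStepA (s : Int × Int × Int × Int × Int × Int)
    (result : List (String × List (String × Option Int))) : Int × Int × Int × Int × Int × Int :=
  let md := pvMeta result
  let gt_ref := pvGetOpt md "closest_idx"
  let gt_score := pvGetOpt md "progress_score"
  let (num, na, rn, rna, sn, sna) := s
  let (rn, rna) := if gt_ref.isSome then (rn + 1, rna) else (rn, rna + 1)
  let (sn, sna) := if gt_score.isSome then (sn + 1, sna) else (sn, sna + 1)
  let (num, na) := if gt_ref.isSome && gt_score.isSome then (num + 1, na) else (num, na + 1)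
  (num, na, rn, rna, sn, sna)

def calculate_gt_distribution (results : List (List (String × List (String × Option Int)))) : List (String × Int) :=
  let s := results.foldl pvStepA (0, 0, 0, 0, 0, 0)
  [("gt_numeric_count", s.1), ("gt_na_count", s.2.1), ("gt_ref_numeric", s.2.2.1),
   ("gt_ref_na", s.2.2.2.1), ("gt_score_numeric", s.2.2.2.2.1), ("gt_score_na", s.2.2.2.2.2)]

-- ===== PORT B =====
def pvKey (result : List (String × List (String × Option Int))) : Bool × Bool :=
  let md := pvMeta result
  ((pvGetOpt md "closest_idx").isSome, (pvGetOpt md "progress_score").isSome)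

def calculate_gt_distribution_alt (results : List (List (String × List (String × Option Int)))) : List (String × Int) :=
  let table : PySem.Dict (Bool × Bool) Int :=
    results.foldl (fun t result =>
      let key := pvKey result
      t.insert key (t.getD key 0 + 1)) PySem.Dict.empty
  let n : Int := results.length
  let numeric := table.getD (true, true) 0
  let ref_numeric := numeric + table.getD (true, false) 0
  let score_numeric := numeric + table.getD (false, true) 0
  [("gt_numeric_count", numeric), ("gt_na_count", n - numeric), ("gt_ref_numeric", ref_numeric),
   ("gt_ref_na", n - ref_numeric), ("gt_score_numeric", score_numeric), ("gt_score_na", n - score_numeric)]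

-- ===== PRECONDITION & SPEC =====
def Spec_calculate_gt_distribution (results : List (List (String × List (String × Option Int)))) (out : List (String × Int)) : Prop := out = calculate_gt_distribution_alt results
instance (results : List (List (String × List (String × Option Int)))) (out : List (String × Int)) : Decidable (Spec_calculate_gt_distribution results out) := by unfold Spec_calculate_gt_distribution; infer_instance

-- ===== CLAIM (what is proved, stated in full; the proofs are below) =====
def Claim_equal_calculate_gt_distribution : Prop := ∀ (results : List (List (String × List (String × Option Int)))), Dom_calculate_gt_distribution results → Spec_calculate_gt_distribution results (calculate_gt_distribution results)

-- ===== LEMMAS AND PROOFS =====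

-- counts of the three key patterns, as B reads them from the table
def pvNtt (l : List (List (String × List (String × Option Int)))) : Int :=
  ((l.map pvKey).count (true, true) : Int)
def pvNtf (l : List (List (String × List (String × Option Int)))) : Int :=
  ((l.map pvKey).count (true, false) : Int)
def pvNft (l : List (List (String × List (String × Option Int)))) : Int :=
  ((l.map pvKey).count (false, true) : Int)

theorem pvStepA_eq (a b c d e f : Int) (r : List (String × List (String × Option Int))) :
    pvStepA (a, b, c, d, e, f) r =
      (a + (if pvKey r = (true, true) then 1 else 0),
       b + (if pvKey r = (true, true) then 0 else 1),
       c + (if (pvKey r).1 then 1 else 0),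
       d + (if (pvKey r).1 then 0 else 1),
       e + (if (pvKey r).2 then 1 else 0),
       f + (if (pvKey r).2 then 0 else 1)) := by
  cases h1 : (pvGetOpt (pvMeta r) "closest_idx").isSome <;>
    cases h2 : (pvGetOpt (pvMeta r) "progress_score").isSome <;>
      simp [pvStepA, pvKey, h1, h2]

-- A's fold, characterised: each accumulator advances by the corresponding pattern count
theorem pvFoldA_eq (l : List (List (String × List (String × Option Int))))
    (a b c d e f : Int) :
    l.foldl pvStepA (a, b, c, d, e, f)
    = (a + pvNtt l, b + ((l.length : Int) - pvNtt l),
       c + (pvNtt l + pvNtf l), d + ((l.length : Int) - (pvNtt l + pvNtf l)),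
       e + (pvNtt l + pvNft l), f + ((l.length : Int) - (pvNtt l + pvNft l))) := by
  induction l generalizing a b c d e f with
  | nil => simp [pvNtt, pvNtf, pvNft]
  | cons r l ih =>
    rw [List.foldl_cons, pvStepA_eq, ih]
    rcases hk : pvKey r with ⟨x, y⟩
    cases x <;> cases y <;>
      simp only [pvNtt, pvNtf, pvNft, List.map_cons, List.count_cons, hk, List.length_cons,
        Prod.mk.injEq, beq_iff_eq] <;>
      simp <;> omega

-- B's table lookups are pattern counts
theorem pvTable_getD (l : List (List (String × List (String × Option Int)))) (k : Bool × Bool) :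
    (l.foldl (fun (t : PySem.Dict (Bool × Bool) Int) result =>
        let key := pvKey result
        t.insert key (t.getD key 0 + 1)) PySem.Dict.empty).getD k 0
    = ((l.map pvKey).count k : Int) := by
  have h := PySem.Dict.getD_foldl_insert_add_one (l := l.map pvKey)
      (d := (PySem.Dict.empty : PySem.Dict (Bool × Bool) Int)) (v := k)
  rw [List.foldl_map] at h
  simpa [PySem.Dict.getD_empty] using h

-- ===== VERDICT (by name: the statement is the Claim_ definition above) =====
theorem calculate_gt_distribution_spec : Claim_equal_calculate_gt_distribution := by
  intro results _
  show calculate_gt_distribution results = calculate_gt_distribution_alt results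
  unfold calculate_gt_distribution calculate_gt_distribution_alt
  simp only [pvFoldA_eq, pvTable_getD]
  simp [pvNtt, pvNtf, pvNft]
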